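-- pv_equiv track=rewrite | github.com/PARKINHYO/Algorithm | kpu x coupang/2.py | solution
-- ===== SOURCE A (Python) =====
-- from collections import defaultdict
--
-- def solution(k, score):
--
--     score_diff = []
--     score_diff_dic = defaultdict(int)
--
--     for i in range(len(score) - 1):
--         score_diff.append(score[i] - score[i + 1])
--         score_diff_dic[score[i] - score[i + 1]] += 1
--
--     keys = []
--     for key, val in score_diff_dic.items():
--         if val >= k:
--             keys.append(key)
--
--     del_index = []
--     for i in range(len(score_diff)):
--         if score_diff[i] in keys:
--             del_index.append(i)
--
--     del_index_set = set(del_index)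
--     for i in del_index:
--         del_index_set.add(i+1)
--
--     return len(score)-len(del_index_set)
-- ===== SOURCE B (Python) =====
-- from collections import Counter
--
-- def solution(k, score):
--     diffs = [a - b for a, b in zip(score, score[1:])]
--     freq = Counter(diffs)
--     deleted = 0
--     run = 0
--     for d in diffs:
--         if freq[d] >= k:
--             run += 1
--         else:
--             if run:
--                 deleted += run + 1
--             run = 0
--     if run:
--         deleted += run + 1
--     return len(score) - deleted
-- ===== Notes on version B (the rewrite author's own statement) =====
-- stated objective: alternative
-- what changed: B replaces A's delete-index list plus shifted-set union plus length subtraction by run-length counting: it scans the diffs once and, for each maximal run of L consecutive frequent diffs, counts L+1 deleted rows (the union of the intervals {i,i+1}), so no index set is ever materialised.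
import Mathlib
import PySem

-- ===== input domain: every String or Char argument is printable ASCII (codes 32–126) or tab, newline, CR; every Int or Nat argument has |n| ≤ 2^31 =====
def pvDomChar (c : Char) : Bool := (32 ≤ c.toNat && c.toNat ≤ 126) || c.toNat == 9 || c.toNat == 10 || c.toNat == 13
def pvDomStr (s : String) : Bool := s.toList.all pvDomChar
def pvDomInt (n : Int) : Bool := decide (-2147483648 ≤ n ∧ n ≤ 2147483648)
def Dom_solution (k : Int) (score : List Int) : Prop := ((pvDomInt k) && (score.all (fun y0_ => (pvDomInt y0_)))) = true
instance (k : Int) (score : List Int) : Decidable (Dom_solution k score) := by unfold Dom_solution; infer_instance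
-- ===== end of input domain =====

-- B replaces A's delete-index list + shifted-set union + length subtraction by one run-length
-- scan of the diffs (each maximal run of L frequent diffs deletes L+1 rows); objective: alternative.

-- ===== PORT A =====
def solution (k : Int) (score : List Int) : Int :=
  let sd :=
    (PySem.List.pyRange 0 ((score.length : Int) - 1) 1).foldl
      (fun (st : List Int × PySem.Dict Int Int) i =>
        (st.1 ++ [PySem.List.pyGetD score i 0 - PySem.List.pyGetD score (i + 1) 0],
         st.2.modify (PySem.List.pyGetD score i 0 - PySem.List.pyGetD score (i + 1) 0) 0 (· + 1)))
      ([], PySem.Dict.empty)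
  let score_diff := sd.1
  let dic := sd.2
  let keys := dic.items.foldl (fun acc kv => if k ≤ kv.2 then acc ++ [kv.1] else acc) []
  let del_index :=
    (PySem.List.pyRange 0 ((score_diff.length : Int)) 1).foldl
      (fun acc i => if keys.contains (PySem.List.pyGetD score_diff i 0) then acc ++ [i] else acc) []
  let s0 : PySem.Set Int := PySem.Set.ofList del_index
  let s1 := del_index.foldl (fun (s : PySem.Set Int) i => PySem.Set.add s (i + 1)) s0
  (score.length : Int) - (s1.length : Int)

-- ===== PORT B =====
-- zip(score, score[1:]) ported as score.zip (score.drop 1); Counter(diffs) as PySem.Dict.counter.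
def solution_alt (k : Int) (score : List Int) : Int :=
  let diffs := (score.zip (score.drop 1)).map (fun ab => ab.1 - ab.2)
  let freq := PySem.Dict.counter diffs
  let st := diffs.foldl
    (fun (st : Int × Int) d =>
      if k ≤ freq.getD d 0 then (st.1, st.2 + 1)
      else (if st.2 ≠ 0 then st.1 + st.2 + 1 else st.1, 0))
    (0, 0)
  let deleted := if st.2 ≠ 0 then st.1 + st.2 + 1 else st.1
  (score.length : Int) - deleted

-- ===== PRECONDITION & SPEC =====
def Spec_solution (k : Int) (score : List Int) (out : Int) : Prop := out = solution_alt k score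
instance (k : Int) (score : List Int) (out : Int) : Decidable (Spec_solution k score out) := by unfold Spec_solution; infer_instance

-- ===== CLAIM (what is proved, stated in full; the proofs are below) =====
def Claim_equal_solution : Prop := ∀ (k : Int) (score : List Int), Dom_solution k score → Spec_solution k score (solution k score)

-- ===== LEMMAS AND PROOFS =====

-- canonical descriptions of A's intermediate data (proof-only helpers)
def pvDiffs (score : List Int) : List Int :=
  (PySem.List.pyRange 0 ((score.length : Int) - 1) 1).map
    (fun i => PySem.List.pyGetD score i 0 - PySem.List.pyGetD score (i + 1) 0)

def pvKeys (k : Int) (score : List Int) : List Int :=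
  ((PySem.Dict.counter (pvDiffs score)).items.filter (fun kv => decide (k ≤ kv.2))).map Prod.fst

def pvDel (k : Int) (score : List Int) : List Int :=
  (PySem.List.pyRange 0 (((pvDiffs score).length : Int)) 1).filter
    (fun i => (pvKeys k score).contains (PySem.List.pyGetD (pvDiffs score) i 0))

def pvS (k : Int) (score : List Int) : PySem.Set Int :=
  (pvDel k score).foldl (fun (s : PySem.Set Int) i => PySem.Set.add s (i + 1))
    (PySem.Set.ofList (pvDel k score))

-- B-side proof helpers: the boolean run scan
def pvStep (st : Int × Int) (b : Bool) : Int × Int :=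
  if b then (st.1, st.2 + 1) else (if st.2 ≠ 0 then st.1 + st.2 + 1 else st.1, 0)

def pvFlush (st : Int × Int) : Int := if st.2 ≠ 0 then st.1 + st.2 + 1 else st.1

def pvFcnt : Bool → List Bool → Int
  | prev, [] => if prev then 1 else 0
  | prev, x :: bs => (if x || prev then 1 else 0) + pvFcnt x bs

def pvTouch (bs : List Bool) (prev : Bool) (q : Nat) : Bool :=
  bs.getD q false || (if q = 0 then prev else bs.getD (q - 1) false)

theorem nodup_foldl_add {α : Type} [BEq α] [LawfulBEq α] (f : α → α) (l : List α)
    (s : PySem.Set α) (hs : s.Nodup) :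
    (l.foldl (fun (t : PySem.Set α) b => PySem.Set.add t (f b)) s).Nodup := by
  induction l generalizing s with
  | nil => exact hs
  | cons x xs ih => exact ih _ (PySem.Set.nodup_add s (f x) hs)

theorem pvKeys_eq (k : Int) (score : List Int) : pvKeys k score
    = (PySem.Set.ofList (pvDiffs score)).filter
        (fun d => decide (k ≤ (((pvDiffs score).count d : Int)))) := by
  unfold pvKeys
  rw [PySem.Dict.items_counter]
  simp [List.filter_map, Function.comp_def]

theorem mem_pvS (k : Int) (score : List Int) (p : Int) :
    p ∈ pvS k score ↔ p ∈ pvDel k score ∨ (p - 1) ∈ pvDel k score := by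
  unfold pvS
  rw [PySem.Set.mem_foldl_add (f := fun b => b + 1)]
  simp only [PySem.Set.mem_ofList]
  constructor
  · rintro (h | ⟨b, hb, rfl⟩)
    · exact Or.inl h
    · right
      simpa using hb
  · rintro (h | h)
    · exact Or.inl h
    · exact Or.inr ⟨p - 1, h, by ring⟩

theorem mem_pvDel (k : Int) (score : List Int) (i : Int) : i ∈ pvDel k score ↔
    (0 ≤ i ∧ i < ((pvDiffs score).length : Int)) ∧
      (pvKeys k score).contains (PySem.List.pyGetD (pvDiffs score) i 0) = true := by
  unfold pvDel
  simp [List.mem_filter, PySem.List.mem_pyRange_one]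

theorem pvS_nodup (k : Int) (score : List Int) : (pvS k score).Nodup :=
  nodup_foldl_add _ _ _ (PySem.Set.nodup_ofList _)

theorem length_pvDiffs (score : List Int) :
    ((pvDiffs score).length : Int) = max ((score.length : Int) - 1) 0 := by
  unfold pvDiffs
  simp [PySem.List.length_pyRange_one]
  omega

theorem pvS_subset_range (k : Int) (score : List Int) (p : Int) (hp : p ∈ pvS k score) :
    0 ≤ p ∧ p < (score.length : Int) := by
  have hL := length_pvDiffs score
  have h0 : (0 : Int) ≤ (score.length : Int) := Int.natCast_nonneg _
  rcases (mem_pvS k score p).1 hp with h | h <;>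
    rcases (mem_pvDel k score _).1 h with ⟨⟨h1, h2⟩, _⟩ <;> omega

theorem pvS_length (k : Int) (score : List Int) : ((pvS k score).length : Int)
    = (((PySem.List.pyRange 0 (score.length : Int) 1).countP
        (fun p => decide (p ∈ pvS k score))) : Int) := by
  have hperm : (pvS k score).Perm
      ((PySem.List.pyRange 0 (score.length : Int) 1).filter
        (fun p => decide (p ∈ pvS k score))) := by
    refine (List.perm_ext_iff_of_nodup (pvS_nodup k score)
      ((PySem.List.nodup_pyRange_one _ _).filter _)).mpr ?_
    intro x
    simp only [List.mem_filter, PySem.List.mem_pyRange_one, decide_eq_true_eq]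
    constructor
    · intro hx
      exact ⟨pvS_subset_range k score x hx, hx⟩
    · exact fun h => h.2
  rw [List.countP_eq_length_filter]
  exact congrArg _ hperm.length_eq

theorem A_canon (k : Int) (score : List Int) :
    solution k score = (score.length : Int) - ((pvS k score).length : Int) := by
  have h1 : (PySem.List.pyRange 0 ((score.length : Int) - 1) 1).foldl
      (fun (st : List Int × PySem.Dict Int Int) i =>
        (st.1 ++ [PySem.List.pyGetD score i 0 - PySem.List.pyGetD score (i + 1) 0],
         st.2.modify (PySem.List.pyGetD score i 0 - PySem.List.pyGetD score (i + 1) 0) 0 (· + 1)))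
      ([], PySem.Dict.empty)
      = (pvDiffs score, PySem.Dict.counter (pvDiffs score)) := by
    rw [PySem.List.foldl_prod_mk
        (f := fun (l : List Int) i => l ++ [PySem.List.pyGetD score i 0 - PySem.List.pyGetD score (i + 1) 0])
        (g := fun (d : PySem.Dict Int Int) i => d.modify (PySem.List.pyGetD score i 0 - PySem.List.pyGetD score (i + 1) 0) 0 (· + 1))]
    rw [PySem.List.foldl_append_singleton_eq_map]
    simp only [pvDiffs, List.nil_append, PySem.Dict.counter_eq_foldl, List.foldl_map]
  have h2 : (PySem.Dict.counter (pvDiffs score)).items.foldl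
      (fun (acc : List Int) kv => if k ≤ kv.2 then acc ++ [kv.1] else acc) [] = pvKeys k score := by
    rw [PySem.List.foldl_append_ite (p := fun kv : Int × Int => k ≤ kv.2) (f := Prod.fst)]
    simp [pvKeys]
  have h3 : (PySem.List.pyRange 0 (((pvDiffs score).length : Int)) 1).foldl
      (fun (acc : List Int) i => if (pvKeys k score).contains (PySem.List.pyGetD (pvDiffs score) i 0) then acc ++ [i] else acc) []
      = pvDel k score := by
    rw [PySem.List.foldl_append_ite_eq_filter
        (p := fun i => (pvKeys k score).contains (PySem.List.pyGetD (pvDiffs score) i 0) = true)]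
    simp [pvDel]
  simp only [solution]
  rw [h1]
  dsimp only
  rw [h2, h3]
  rfl

-- the zip-built diff list of B is A's diff list
theorem zip_diffs_eq (score : List Int) :
    (score.zip (score.drop 1)).map (fun ab => ab.1 - ab.2) = pvDiffs score := by
  apply List.ext_getElem
  · simp [pvDiffs, PySem.List.length_pyRange_one]
  · intro i h1 h2
    have hlen : i + 1 < score.length := by
      simp [List.length_zip] at h1
      omega
    simp only [List.getElem_map, List.getElem_zip, List.getElem_drop, pvDiffs]
    rw [PySem.List.getElem_pyRange_one]
    simp only [zero_add]
    have hc : ((i : Int)) + 1 = ((i + 1 : Nat) : Int) := by omega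
    rw [hc]
    rw [PySem.List.pyGetD_eq_getElem score 0 (Int.natCast_nonneg _) (by exact_mod_cast (by omega : i < score.length))]
    rw [PySem.List.pyGetD_eq_getElem score 0 (Int.natCast_nonneg _) (by exact_mod_cast hlen)]
    simp [Nat.add_comm]

-- the run-scan invariant: flushing the fold adds the pending run and counts pvFcnt
theorem run_invariant (bs : List Bool) : ∀ (d r : Int), 0 ≤ r →
    pvFlush (bs.foldl pvStep (d, r)) = d + r + pvFcnt (decide (r ≠ 0)) bs := by
  induction bs with
  | nil =>
      intro d r hr
      by_cases h : r = 0 <;> simp [pvFlush, pvFcnt, h]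
  | cons x bs ih =>
      intro d r hr
      cases x with
      | true =>
          have h1 : pvStep (d, r) true = (d, r + 1) := by simp [pvStep]
          simp only [List.foldl_cons, h1]
          rw [ih d (r + 1) (by omega)]
          have : decide (r + 1 ≠ 0) = true := by simp; omega
          rw [this]
          simp [pvFcnt]
          omega
      | false =>
          by_cases h : r = 0
          · have h1 : pvStep (d, r) false = (d, 0) := by simp [pvStep, h]
            simp only [List.foldl_cons, h1]
            rw [ih d 0 le_rfl]
            simp [pvFcnt, h]
          · have h1 : pvStep (d, r) false = (d + r + 1, 0) := by simp [pvStep, h]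
            simp only [List.foldl_cons, h1]
            rw [ih (d + r + 1) 0 le_rfl]
            simp [pvFcnt, h]
            omega

-- pvFcnt counts the touched positions 0..len bs
theorem pvFcnt_count (bs : List Bool) : ∀ (prev : Bool),
    pvFcnt prev bs = ((List.range (bs.length + 1)).countP (pvTouch bs prev) : Int) := by
  induction bs with
  | nil =>
      intro prev
      simp [pvFcnt, List.range_succ, pvTouch]
  | cons x bs ih =>
      intro prev
      have hr : List.range (bs.length + 1 + 1) = 0 :: (List.range (bs.length + 1)).map Nat.succ :=
        List.range_succ_eq_map
      simp only [List.length_cons, hr, List.countP_cons, List.countP_map]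
      have h0 : pvTouch (x :: bs) prev 0 = (x || prev) := by simp [pvTouch]
      have hshift : ∀ q, pvTouch (x :: bs) prev (Nat.succ q) = pvTouch bs x q := by
        intro q
        cases q with
        | zero => simp [pvTouch]
        | succ q' => simp [pvTouch]
      have hc : (List.range (bs.length + 1)).countP (fun q => pvTouch (x :: bs) prev (Nat.succ q))
          = (List.range (bs.length + 1)).countP (pvTouch bs x) := by
        apply List.countP_congr
        intro q _
        rw [hshift]
      simp only [pvFcnt, ih x, Function.comp_def]
      rw [hc, h0]
      cases x <;> cases prev <;> simp <;> omega

-- membership in A's delete set is the touched predicate on the frequent-diff booleans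
theorem getD_freq_bools (k : Int) (score : List Int) (j : Nat) :
    ((((pvDiffs score).map (fun d => (pvKeys k score).contains d)).getD j false) = true)
      ↔ (j < (pvDiffs score).length ∧
          (pvKeys k score).contains (PySem.List.pyGetD (pvDiffs score) (j : Int) 0) = true) := by
  by_cases hj : j < (pvDiffs score).length
  · have hjb : j < ((pvDiffs score).map (fun d => (pvKeys k score).contains d)).length := by
      simpa using hj
    rw [List.getD_eq_getElem _ _ hjb]
    simp only [List.getElem_map]
    rw [PySem.List.pyGetD_eq_getElem (pvDiffs score) 0 (Int.natCast_nonneg _) (by exact_mod_cast hj)]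
    simp [hj]
  · have hjb : ((pvDiffs score).map (fun d => (pvKeys k score).contains d)).length ≤ j := by
      simpa using Nat.le_of_not_lt hj
    rw [List.getD_eq_default _ _ hjb]
    simp [hj]

theorem mem_pvS_iff_touch (k : Int) (score : List Int) (q : Nat) :
    ((q : Int) ∈ pvS k score)
      ↔ pvTouch ((pvDiffs score).map (fun d => (pvKeys k score).contains d)) false q = true := by
  rw [mem_pvS, mem_pvDel, mem_pvDel]
  unfold pvTouch
  simp only [Bool.or_eq_true]
  constructor
  · rintro (⟨⟨h1, h2⟩, h3⟩ | ⟨⟨h1, h2⟩, h3⟩)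
    · left
      exact (getD_freq_bools k score q).2 ⟨by omega, h3⟩
    · right
      have hq0 : ¬ q = 0 := by omega
      rw [if_neg hq0]
      have hc : ((q : Int) - 1) = ((q - 1 : Nat) : Int) := by omega
      rw [hc] at h3
      exact (getD_freq_bools k score (q - 1)).2 ⟨by omega, h3⟩
  · rintro (h | h)
    · rcases (getD_freq_bools k score q).1 h with ⟨hq, hc⟩
      left
      exact ⟨⟨Int.natCast_nonneg _, by omega⟩, hc⟩
    · by_cases hq0 : q = 0
      · subst hq0
        simp at h
      · rw [if_neg hq0] at h
        rcases (getD_freq_bools k score (q - 1)).1 h with ⟨hq, hc⟩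
        right
        have hc2 : ((q : Int) - 1) = ((q - 1 : Nat) : Int) := by omega
        rw [hc2]
        exact ⟨⟨Int.natCast_nonneg _, by omega⟩, hc⟩

-- B's frequency test agrees with membership in A's keys list, for diffs themselves
theorem freq_test_eq (k : Int) (score : List Int) (d : Int) (hd : d ∈ pvDiffs score) :
    (decide (k ≤ (PySem.Dict.counter (pvDiffs score)).getD d 0))
      = (pvKeys k score).contains d := by
  rw [PySem.Dict.getD_counter, pvKeys_eq]
  apply Bool.coe_iff_coe.mp
  simp only [decide_eq_true_eq, List.contains_iff_mem, List.mem_filter,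
    PySem.Set.mem_ofList, decide_eq_true_eq]
  exact ⟨fun h => ⟨hd, h⟩, fun h => h.2⟩

theorem B_canon (k : Int) (score : List Int) :
    solution_alt k score = (score.length : Int)
      - pvFcnt false ((pvDiffs score).map (fun d => (pvKeys k score).contains d)) := by
  simp only [solution_alt]
  rw [zip_diffs_eq]
  have hfold : (pvDiffs score).foldl
      (fun (st : Int × Int) d =>
        if k ≤ (PySem.Dict.counter (pvDiffs score)).getD d 0 then (st.1, st.2 + 1)
        else (if st.2 ≠ 0 then st.1 + st.2 + 1 else st.1, 0))
      (0, 0)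
      = ((pvDiffs score).map (fun d => (pvKeys k score).contains d)).foldl pvStep (0, 0) := by
    rw [List.foldl_map]
    apply PySem.List.foldl_congr_mem
    intro acc x hx
    simp only [pvStep]
    rw [← freq_test_eq k score x hx]
    by_cases h : k ≤ (PySem.Dict.counter (pvDiffs score)).getD x 0 <;> simp [h]
  rw [hfold]
  have hflush : ∀ st : Int × Int, (if st.2 ≠ 0 then st.1 + st.2 + 1 else st.1) = pvFlush st :=
    fun st => rfl
  rw [hflush, run_invariant _ 0 0 le_rfl]
  simp

theorem solution_eq_alt (k : Int) (score : List Int) :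
    solution k score = solution_alt k score := by
  rcases score with _ | ⟨a, rest⟩
  · have hd : pvDiffs ([] : List Int) = [] := by
      simp [pvDiffs, PySem.List.pyRange_one_eq_nil (by omega : (-1 : Int) ≤ 0)]
    have hdel : pvDel k [] = [] := by
      simp [pvDel, hd, PySem.List.pyRange_one_eq_nil (by omega : (0 : Int) ≤ 0)]
    have hS : pvS k [] = [] := by
      simp [pvS, hdel]
    rw [A_canon, B_canon, hS, hd]
    simp [pvFcnt]
  · set score := a :: rest
    have hn : 1 ≤ score.length := by simp [score]
    rw [A_canon, B_canon, pvS_length]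
    set bs := (pvDiffs score).map (fun d => (pvKeys k score).contains d) with hbs
    have hm : bs.length + 1 = score.length := by
      have := length_pvDiffs score
      have hlen : (pvDiffs score).length = score.length - 1 := by omega
      simp [hbs, hlen]
      omega
    rw [pvFcnt_count bs false, hm]
    congr 2
    rw [PySem.List.pyRange_one, List.countP_map]
    apply List.countP_congr
    intro q _
    simp only [Function.comp_def, zero_add]
    rw [Bool.eq_iff_iff, decide_eq_true_iff, hbs]
    simpa using mem_pvS_iff_touch k score q

-- ===== VERDICT (by name: the statement is the Claim_ definition above) =====
theorem solution_spec : Claim_equal_solution := by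
  intro k score _
  unfold Spec_solution
  exact solution_eq_alt k score
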